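-- pv_equiv track=rewrite | github.com/DJMcClellan1966/test-playground | blueprints/archive/dev.py | detect_features
-- ===== SOURCE A (Python) =====
-- def detect_features(idea: str) -> list:
--     """Detect features from natural language."""
--     idea_lower = idea.lower()
--     features = []
--
--     if any(w in idea_lower for w in ["login", "auth", "user", "password", "secure", "private"]):
--         features.append("auth")
--     if any(w in idea_lower for w in ["search", "find", "filter", "query", "lookup"]):
--         features.append("search")
--     if any(w in idea_lower for w in ["export", "download", "backup", "save as"]):
--         features.append("export")
--
--     return features
-- ===== SOURCE B (Python) =====
-- KEYWORD_TAGS = [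
--     ("login", "auth"), ("auth", "auth"), ("user", "auth"), ("password", "auth"),
--     ("secure", "auth"), ("private", "auth"),
--     ("search", "search"), ("find", "search"), ("filter", "search"),
--     ("query", "search"), ("lookup", "search"),
--     ("export", "export"), ("download", "export"), ("backup", "export"),
--     ("save as", "export"),
-- ]
-- TAG_ORDER = ["auth", "search", "export"]
--
-- def detect_features(idea: str) -> list:
--     # Single scan: at each position test which keywords start there (naive
--     # multi-pattern matcher), collect their tags, emit in canonical order.
--     text = idea.lower()
--     found = set()
--     for i in range(len(text)):
--         for kw, tag in KEYWORD_TAGS: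
--             if text.startswith(kw, i):
--                 found.add(tag)
--     return [t for t in TAG_ORDER if t in found]
-- ===== Notes on version B (the rewrite author's own statement) =====
-- stated objective: alternative
-- what changed: Replaces A's three per-keyword substring-search conditionals with a single left-to-right scan of the text that tests at each position which keywords of a flat (keyword, tag) table start there, accumulating matched tags in a set and emitting them in canonical order.
import Mathlib
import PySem

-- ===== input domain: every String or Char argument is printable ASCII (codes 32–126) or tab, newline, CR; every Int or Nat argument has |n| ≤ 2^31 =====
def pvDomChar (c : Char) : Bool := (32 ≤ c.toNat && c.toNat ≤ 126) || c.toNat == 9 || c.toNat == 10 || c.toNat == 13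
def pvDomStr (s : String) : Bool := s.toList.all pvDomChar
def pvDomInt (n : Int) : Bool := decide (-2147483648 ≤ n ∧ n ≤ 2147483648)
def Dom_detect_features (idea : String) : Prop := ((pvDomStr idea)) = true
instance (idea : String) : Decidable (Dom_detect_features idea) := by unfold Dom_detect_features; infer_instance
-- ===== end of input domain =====

-- B replaces A's per-keyword substring searches by a single left-to-right position
-- scan collecting matched tags in a set (alternative decomposition, same cost).

-- ===== PORT A =====
-- A: lowercase once, then three keyword-group conditionals appending to an accumulator.
def detect_features (idea : String) : List String :=
  let idea_lower := PySem.Str.lower idea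
  let features : List String := []
  let features := if ["login", "auth", "user", "password", "secure", "private"].any (fun w => PySem.Str.isIn w idea_lower) then features ++ ["auth"] else features
  let features := if ["search", "find", "filter", "query", "lookup"].any (fun w => PySem.Str.isIn w idea_lower) then features ++ ["search"] else features
  let features := if ["export", "download", "backup", "save as"].any (fun w => PySem.Str.isIn w idea_lower) then features ++ ["export"] else features
  features

-- ===== PORT B =====
-- B: flat (keyword, tag) table; scan every text position, test which keywords start
-- there, accumulate their tags in a set; finally emit tags in canonical order.
def pvKEYWORD_TAGS : List (List Char × String) :=
  [("login".toList, "auth"), ("auth".toList, "auth"), ("user".toList, "auth"),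
   ("password".toList, "auth"), ("secure".toList, "auth"), ("private".toList, "auth"),
   ("search".toList, "search"), ("find".toList, "search"), ("filter".toList, "search"),
   ("query".toList, "search"), ("lookup".toList, "search"),
   ("export".toList, "export"), ("download".toList, "export"),
   ("backup".toList, "export"), ("save as".toList, "export")]

def pvTAG_ORDER : List String := ["auth", "search", "export"]

def detect_features_alt (idea : String) : List String :=
  let text := PySem.Chars.lower idea.toList
  let found : PySem.Set String :=
    (List.range text.length).foldl (fun found i =>
      pvKEYWORD_TAGS.foldl (fun found p =>
        if PySem.Chars.startswith (text.drop i) p.1 then PySem.Set.add found p.2 else found) found)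
      PySem.Set.empty
  pvTAG_ORDER.filter (fun t => found.contains t)

-- ===== PRECONDITION & SPEC =====
def Spec_detect_features (idea : String) (out : List String) : Prop := out = detect_features_alt idea
instance (idea : String) (out : List String) : Decidable (Spec_detect_features idea out) := by unfold Spec_detect_features; infer_instance

-- ===== CLAIM (what is proved, stated in full; the proofs are below) =====
def Claim_equal_detect_features : Prop := ∀ (idea : String), Dom_detect_features idea → Spec_detect_features idea (detect_features idea)

-- ===== LEMMAS AND PROOFS =====

-- membership after Set.add
theorem pv_contains_add (s : PySem.Set String) (x t : String) :
    (PySem.Set.add s x).contains t = (s.contains t || x == t) := by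
  simp only [PySem.Set.add]
  by_cases hx : s.contains x = true
  · have hm : x ∈ s := by simpa using hx
    rw [if_pos hx]
    by_cases ht : x = t
    · subst ht; simp [hm]
    · simp [ht]
  · have hm : x ∉ s := by simpa using hx
    rw [if_neg hx]
    by_cases ht : x = t
    · subst ht; simp [hm]
    · simp [ht, Ne.symm ht]

-- inner foldl over the keyword table
theorem pv_contains_inner (kws : List (List Char × String)) (s : PySem.Set String)
    (C : List Char × String → Bool) (t : String) :
    (kws.foldl (fun fd p => if C p then PySem.Set.add fd p.2 else fd) s).contains t
      = (s.contains t || kws.any (fun p => C p && p.2 == t)) := by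
  induction kws generalizing s with
  | nil => simp
  | cons p ps ih =>
    by_cases h : C p
    · rw [List.foldl_cons, if_pos h, ih, pv_contains_add]
      simp only [List.any_cons, h, Bool.true_and]
      cases s.contains t <;> cases (p.2 == t) <;> simp
    · rw [List.foldl_cons, if_neg h, ih]
      simp [List.any_cons, h]

-- outer foldl over the positions
theorem pv_contains_outer (l : List Nat) (s : PySem.Set String)
    (C : Nat → List Char × String → Bool) (t : String) :
    (l.foldl (fun fd i =>
        pvKEYWORD_TAGS.foldl (fun fd p => if C i p then PySem.Set.add fd p.2 else fd) fd) s).contains t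
      = (s.contains t || l.any (fun i => pvKEYWORD_TAGS.any (fun p => C i p && p.2 == t))) := by
  induction l generalizing s with
  | nil => simp
  | cons i is ih =>
    rw [List.foldl_cons, ih, pv_contains_inner]
    cases s.contains t <;> simp

-- position-scan match of a nonempty keyword = substring test
theorem pv_scan_eq_isIn (text kw : List Char) (hk : kw ≠ []) :
    (List.range text.length).any (fun i => PySem.Chars.startswith (text.drop i) kw)
      = PySem.Chars.isIn kw text := by
  rw [Bool.eq_iff_iff]
  constructor
  · intro h
    obtain ⟨i, _, hs⟩ := List.any_eq_true.1 h
    exact (PySem.Chars.exists_prefix_drop_iff_isIn kw text).1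
      ⟨i, (PySem.Chars.startswith_iff _ _).1 hs⟩
  · intro h
    obtain ⟨j, hj⟩ := (PySem.Chars.exists_prefix_drop_iff_isIn kw text).2 h
    have hjlt : j < text.length := by
      by_contra hge
      rw [List.drop_eq_nil_of_le (Nat.le_of_not_lt hge), List.prefix_nil] at hj
      exact hk hj
    exact List.any_eq_true.2 ⟨j, List.mem_range.2 hjlt, (PySem.Chars.startswith_iff _ _).2 hj⟩

-- swap the two 'any's: scan-over-positions of the whole table, restricted to a tag,
-- equals per-keyword existence
theorem pv_any_swap (l : List Nat) (C : Nat → List Char × String → Bool) (t : String) :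
    l.any (fun i => pvKEYWORD_TAGS.any (fun p => C i p && p.2 == t))
      = pvKEYWORD_TAGS.any (fun p => (p.2 == t) && l.any (fun i => C i p)) := by
  rw [Bool.eq_iff_iff]
  simp only [List.any_eq_true, Bool.and_eq_true]
  constructor
  · rintro ⟨i, hi, p, hp, hC, ht⟩
    exact ⟨p, hp, ht, i, hi, hC⟩
  · rintro ⟨p, hp, ht, i, hi, hC⟩
    exact ⟨i, hi, p, hp, hC, ht⟩

-- ===== VERDICT (by name: the statement is the Claim_ definition above) =====
theorem detect_features_spec : Claim_equal_detect_features := by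
  intro idea _
  unfold Spec_detect_features detect_features detect_features_alt
  simp only [pv_contains_outer, pv_any_swap]
  simp only [pvKEYWORD_TAGS, pvTAG_ORDER, List.any_cons, List.any_nil,
    List.filter_cons, List.filter_nil, PySem.Set.contains, PySem.Set.empty]
  rw [pv_scan_eq_isIn _ ("login".toList) (by decide),
      pv_scan_eq_isIn _ ("auth".toList) (by decide),
      pv_scan_eq_isIn _ ("user".toList) (by decide),
      pv_scan_eq_isIn _ ("password".toList) (by decide),
      pv_scan_eq_isIn _ ("secure".toList) (by decide),
      pv_scan_eq_isIn _ ("private".toList) (by decide),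
      pv_scan_eq_isIn _ ("search".toList) (by decide),
      pv_scan_eq_isIn _ ("find".toList) (by decide),
      pv_scan_eq_isIn _ ("filter".toList) (by decide),
      pv_scan_eq_isIn _ ("query".toList) (by decide),
      pv_scan_eq_isIn _ ("lookup".toList) (by decide),
      pv_scan_eq_isIn _ ("export".toList) (by decide),
      pv_scan_eq_isIn _ ("download".toList) (by decide),
      pv_scan_eq_isIn _ ("backup".toList) (by decide),
      pv_scan_eq_isIn _ ("save as".toList) (by decide)]
  simp only [PySem.Str.isIn_eq, PySem.Str.lower]
  split_ifs <;> simp_all
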